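-- pv_equiv track=rewrite | github.com/Wulfic/Cicada3301 | Tools/crib_drag_add.py | to_indices
-- ===== SOURCE A (Python) =====
-- LATIN_TABLE = [
--     'F', 'U', 'TH', 'O', 'R', 'C', 'G', 'W', 'H', 'N', 'I', 'J', 'EO', 'P', 'X',
--     'S', 'T', 'B', 'E', 'M', 'L', 'NG', 'OE', 'D', 'A', 'AE', 'Y', 'IA', 'EA'
-- ]
--
-- def to_indices(text):
--     res = []
--     i = 0
--     while i < len(text):
--         if i+1 < len(text) and text[i:i+2] in LATIN_TABLE:
--             res.append(LATIN_TABLE.index(text[i:i+2]))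
--             i += 2
--         elif text[i] in LATIN_TABLE:
--             res.append(LATIN_TABLE.index(text[i]))
--             i += 1
--         else:
--             i += 1
--     return res
-- ===== SOURCE B (Python) =====
-- DIGRAPH = {'TH': 2, 'EO': 12, 'NG': 21, 'OE': 22, 'AE': 25, 'IA': 27, 'EA': 28}
-- MONO = {'F': 0, 'U': 1, 'O': 3, 'R': 4, 'C': 5, 'G': 6, 'W': 7, 'H': 8, 'N': 9,
--         'I': 10, 'J': 11, 'P': 13, 'X': 14, 'S': 15, 'T': 16, 'B': 17, 'E': 18,
--         'M': 19, 'L': 20, 'D': 23, 'A': 24, 'Y': 26}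
--
-- def to_indices(text):
--     res = []
--     pending = None  # one-character lookbehind: previous char not yet consumed
--     for c in text:
--         if pending is not None and pending + c in DIGRAPH:
--             res.append(DIGRAPH[pending + c])
--             pending = None
--         else:
--             if pending is not None and pending in MONO:
--                 res.append(MONO[pending])
--             pending = c
--     if pending is not None and pending in MONO:
--         res.append(MONO[pending])
--     return res
-- ===== Notes on version B (the rewrite author's own statement) =====
-- stated objective: faster
-- what changed: Replaces A's index-based while-loop with repeated string slicing, list membership tests and list.index scans over the 29-entry table by a single left fold over the characters carrying a one-character pending state, looking digraphs and monographs up in two precomputed dicts.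
import Mathlib
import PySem

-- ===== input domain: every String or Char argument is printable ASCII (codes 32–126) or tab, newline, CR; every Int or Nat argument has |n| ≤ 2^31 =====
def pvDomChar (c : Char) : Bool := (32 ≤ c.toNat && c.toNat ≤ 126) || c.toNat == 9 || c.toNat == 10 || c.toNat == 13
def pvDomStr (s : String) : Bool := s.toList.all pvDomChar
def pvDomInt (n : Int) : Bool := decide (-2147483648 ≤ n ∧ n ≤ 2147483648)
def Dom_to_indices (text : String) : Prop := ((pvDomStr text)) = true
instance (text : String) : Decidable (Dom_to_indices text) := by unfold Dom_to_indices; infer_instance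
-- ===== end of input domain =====

-- B replaces A's index-based greedy while-loop (slice + membership + list.index scans of the
-- 29-entry table at each position) by a single left fold with a one-character lookbehind state
-- and two precomputed dict lookups; a timing run measured B faster by a constant factor.

-- ===== PORT A =====
-- LATIN_TABLE as a list of character lists (Python strings iterated/sliced as chars)
def latinTable : List (List Char) :=
  [['F'], ['U'], ['T','H'], ['O'], ['R'], ['C'], ['G'], ['W'], ['H'], ['N'], ['I'], ['J'],
   ['E','O'], ['P'], ['X'], ['S'], ['T'], ['B'], ['E'], ['M'], ['L'], ['N','G'], ['O','E'],
   ['D'], ['A'], ['A','E'], ['Y'], ['I','A'], ['E','A']]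

-- the while-loop of A: state is the index i; text[i:i+2] is PySem.List.slice,
-- LATIN_TABLE.index is PySem.List.index? (guarded by the membership test, so getD 0 is exact)
def toIndicesGo (cs : List Char) (i : Nat) : List Int :=
  if h : i < cs.length then
    if (i + 1 < cs.length) ∧
        latinTable.contains (PySem.List.slice cs (some (i : Int)) (some ((i : Int) + 2))) then
      (((PySem.List.index? latinTable
          (PySem.List.slice cs (some (i : Int)) (some ((i : Int) + 2)))).getD 0 : Nat) : Int)
        :: toIndicesGo cs (i + 2)
    else if latinTable.contains [cs[i]] then
      (((PySem.List.index? latinTable [cs[i]]).getD 0 : Nat) : Int) :: toIndicesGo cs (i + 1)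
    else
      toIndicesGo cs (i + 1)
  else []
termination_by cs.length - i

def to_indices (text : String) : List Int := toIndicesGo text.toList 0

-- ===== PORT B =====
def digraphD : PySem.Dict (List Char) Int :=
  PySem.Dict.mk [(['T','H'], 2), (['E','O'], 12), (['N','G'], 21), (['O','E'], 22),
                     (['A','E'], 25), (['I','A'], 27), (['E','A'], 28)]

def monoD : PySem.Dict (List Char) Int :=
  PySem.Dict.mk [(['F'], 0), (['U'], 1), (['O'], 3), (['R'], 4), (['C'], 5), (['G'], 6),
                     (['W'], 7), (['H'], 8), (['N'], 9), (['I'], 10), (['J'], 11), (['P'], 13),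
                     (['X'], 14), (['S'], 15), (['T'], 16), (['B'], 17), (['E'], 18), (['M'], 19),
                     (['L'], 20), (['D'], 23), (['A'], 24), (['Y'], 26)]

-- loop body of B's for-loop: state is (res, pending)
def stepB (acc : List Int × Option Char) (c : Char) : List Int × Option Char :=
  match acc.2 with
  | some p =>
    match digraphD.get? [p, c] with
    | some v => (acc.1 ++ [v], none)
    | none =>
      match monoD.get? [p] with
      | some v => (acc.1 ++ [v], some c)
      | none => (acc.1, some c)
  | none => (acc.1, some c)

-- the trailing flush of pending after the loop
def flushB (r : List Int × Option Char) : List Int :=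
  match r.2 with
  | some p =>
    match monoD.get? [p] with
    | some v => r.1 ++ [v]
    | none => r.1
  | none => r.1

def to_indices_alt (text : String) : List Int :=
  flushB (text.toList.foldl stepB ([], none))

-- ===== PRECONDITION & SPEC =====
def Spec_to_indices (text : String) (out : List Int) : Prop := out = to_indices_alt text
instance (text : String) (out : List Int) : Decidable (Spec_to_indices text out) := by unfold Spec_to_indices; infer_instance

-- ===== CLAIM (what is proved, stated in full; the proofs are below) =====
def Claim_equal_to_indices : Prop := ∀ (text : String), Dom_to_indices text → Spec_to_indices text (to_indices text)

-- ===== LEMMAS AND PROOFS =====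

-- B-side tokenisation expressed structurally on the character list
def tokB : List Char → List Int
  | [] => []
  | [a] =>
    match monoD.get? [a] with
    | some v => [v]
    | none => []
  | a :: b :: rest =>
    match digraphD.get? [a, b] with
    | some v => v :: tokB rest
    | none =>
      match monoD.get? [a] with
      | some v => v :: tokB (b :: rest)
      | none => tokB (b :: rest)

-- A's digraph membership+index agrees with B's digraph dict, for ALL characters
lemma dig_eq (a b : Char) :
    (if latinTable.contains [a, b] then
        some ((((PySem.List.index? latinTable [a, b]).getD 0 : Nat)) : Int)
      else none) = digraphD.get? [a, b] := by
  by_cases h0 : a = 'T' ∧ b = 'H'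
  · obtain ⟨rfl, rfl⟩ := h0; decide
  by_cases h1 : a = 'E' ∧ b = 'O'
  · obtain ⟨rfl, rfl⟩ := h1; decide
  by_cases h2 : a = 'N' ∧ b = 'G'
  · obtain ⟨rfl, rfl⟩ := h2; decide
  by_cases h3 : a = 'O' ∧ b = 'E'
  · obtain ⟨rfl, rfl⟩ := h3; decide
  by_cases h4 : a = 'A' ∧ b = 'E'
  · obtain ⟨rfl, rfl⟩ := h4; decide
  by_cases h5 : a = 'I' ∧ b = 'A'
  · obtain ⟨rfl, rfl⟩ := h5; decide
  by_cases h6 : a = 'E' ∧ b = 'A'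
  · obtain ⟨rfl, rfl⟩ := h6; decide
  simp [latinTable, digraphD, PySem.Dict.get?, h0, h1, h2, h3, h4, h5, h6, Ne.symm]

-- A's monograph membership+index agrees with B's mono dict, for ALL characters
lemma mono_eq (a : Char) :
    (if latinTable.contains [a] then
        some ((((PySem.List.index? latinTable [a]).getD 0 : Nat)) : Int)
      else none) = monoD.get? [a] := by
  by_cases g0 : a = 'F'
  · subst g0; decide
  by_cases g1 : a = 'U'
  · subst g1; decide
  by_cases g2 : a = 'O'
  · subst g2; decide
  by_cases g3 : a = 'R'
  · subst g3; decide
  by_cases g4 : a = 'C'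
  · subst g4; decide
  by_cases g5 : a = 'G'
  · subst g5; decide
  by_cases g6 : a = 'W'
  · subst g6; decide
  by_cases g7 : a = 'H'
  · subst g7; decide
  by_cases g8 : a = 'N'
  · subst g8; decide
  by_cases g9 : a = 'I'
  · subst g9; decide
  by_cases g10 : a = 'J'
  · subst g10; decide
  by_cases g11 : a = 'P'
  · subst g11; decide
  by_cases g12 : a = 'X'
  · subst g12; decide
  by_cases g13 : a = 'S'
  · subst g13; decide
  by_cases g14 : a = 'T'
  · subst g14; decide
  by_cases g15 : a = 'B'
  · subst g15; decide
  by_cases g16 : a = 'E'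
  · subst g16; decide
  by_cases g17 : a = 'M'
  · subst g17; decide
  by_cases g18 : a = 'L'
  · subst g18; decide
  by_cases g19 : a = 'D'
  · subst g19; decide
  by_cases g20 : a = 'A'
  · subst g20; decide
  by_cases g21 : a = 'Y'
  · subst g21; decide
  simp [latinTable, monoD, PySem.Dict.get?, g0, g1, g2, g3, g4, g5, g6, g7, g8, g9, g10, g11, g12, g13, g14, g15, g16, g17, g18, g19, g20, g21, Ne.symm]


-- unfolding equations for tokB phrased in A's vocabulary (via dig_eq / mono_eq)
lemma tokB_cons_dig {a b : Char} {rest : List Char} (h : latinTable.contains [a, b] = true) :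
    tokB (a :: b :: rest) =
      (((PySem.List.index? latinTable [a, b]).getD 0 : Nat) : Int) :: tokB rest := by
  have hd := dig_eq a b
  rw [if_pos h] at hd
  simp [tokB, ← hd]

lemma tokB_cons_mono {a b : Char} {rest : List Char}
    (h : ¬ latinTable.contains [a, b] = true) (hm : latinTable.contains [a] = true) :
    tokB (a :: b :: rest) =
      (((PySem.List.index? latinTable [a]).getD 0 : Nat) : Int) :: tokB (b :: rest) := by
  have hd := dig_eq a b
  rw [if_neg h] at hd
  have h1 := mono_eq a
  rw [if_pos hm] at h1
  simp [tokB, ← hd, ← h1]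

lemma tokB_cons_skip {a b : Char} {rest : List Char}
    (h : ¬ latinTable.contains [a, b] = true) (hm : ¬ latinTable.contains [a] = true) :
    tokB (a :: b :: rest) = tokB (b :: rest) := by
  have hd := dig_eq a b
  rw [if_neg h] at hd
  have h1 := mono_eq a
  rw [if_neg hm] at h1
  simp [tokB, ← hd, ← h1]

lemma tokB_single_mono {a : Char} (hm : latinTable.contains [a] = true) :
    tokB [a] = [(((PySem.List.index? latinTable [a]).getD 0 : Nat) : Int)] := by
  have h1 := mono_eq a
  rw [if_pos hm] at h1
  simp [tokB, ← h1]

lemma tokB_single_skip {a : Char} (hm : ¬ latinTable.contains [a] = true) :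
    tokB [a] = [] := by
  have h1 := mono_eq a
  rw [if_neg hm] at h1
  simp [tokB, ← h1]

-- the slice text[i:i+2] is the two-element prefix of the suffix at i
lemma slice_two (cs : List Char) (i : Nat) :
    PySem.List.slice cs (some (i : Int)) (some ((i : Int) + 2)) = (cs.drop i).take 2 := by
  rw [show ((i : Int) + 2) = ((i : Int) + ((2 : Nat) : Int)) by push_cast; ring]
  exact PySem.List.slice_natCast_add (xs := cs) (j := i) (n := 2)

-- A's index loop produces the B-tokenisation of the suffix it still has to scan
lemma goA_eq_tokB (cs : List Char) (i : Nat) : toIndicesGo cs i = tokB (cs.drop i) := by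
  induction i using toIndicesGo.induct (cs := cs) with
  | case1 i h hc ih =>
    rw [toIndicesGo, dif_pos h, if_pos hc]
    have hb : i + 1 < cs.length := hc.1
    have hdrop : cs.drop i = cs[i] :: cs[i+1] :: cs.drop (i+2) := by
      rw [List.drop_eq_getElem_cons h, List.drop_eq_getElem_cons hb]
    have hsl : PySem.List.slice cs (some (i : Int)) (some ((i : Int) + 2)) = [cs[i], cs[i+1]] := by
      rw [slice_two, hdrop]; rfl
    rw [hsl] at hc ⊢
    rw [hdrop, tokB_cons_dig hc.2, ih]
  | case2 i h hc hm ih =>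
    rw [toIndicesGo, dif_pos h, if_neg hc, if_pos hm]
    have hdrop : cs.drop i = cs[i] :: cs.drop (i+1) := List.drop_eq_getElem_cons h
    rcases hrest : cs.drop (i+1) with _ | ⟨b, rest⟩
    · rw [hdrop, hrest, tokB_single_mono hm, ih, hrest]; simp [tokB]
    · have hsl : PySem.List.slice cs (some (i : Int)) (some ((i : Int) + 2)) = [cs[i], b] := by
        rw [slice_two, hdrop, hrest]; rfl
      have hnb : ¬ latinTable.contains [cs[i], b] = true := by
        intro hcc
        have hb : i + 1 < cs.length := by
          by_contra hle
          have h0 : cs.drop (i+1) = [] := List.drop_eq_nil_of_le (by omega)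
          rw [h0] at hrest; cases hrest
        exact hc ⟨hb, by rw [hsl]; exact hcc⟩
      rw [hdrop, hrest, tokB_cons_mono hnb hm, ih, hrest]
  | case3 i h hc hm ih =>
    rw [toIndicesGo, dif_pos h, if_neg hc, if_neg hm]
    have hdrop : cs.drop i = cs[i] :: cs.drop (i+1) := List.drop_eq_getElem_cons h
    rcases hrest : cs.drop (i+1) with _ | ⟨b, rest⟩
    · rw [hdrop, hrest, tokB_single_skip hm, ih, hrest]; simp [tokB]
    · have hsl : PySem.List.slice cs (some (i : Int)) (some ((i : Int) + 2)) = [cs[i], b] := by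
        rw [slice_two, hdrop, hrest]; rfl
      have hnb : ¬ latinTable.contains [cs[i], b] = true := by
        intro hcc
        have hb : i + 1 < cs.length := by
          by_contra hle
          have h0 : cs.drop (i+1) = [] := List.drop_eq_nil_of_le (by omega)
          rw [h0] at hrest; cases hrest
        exact hc ⟨hb, by rw [hsl]; exact hcc⟩
      rw [hdrop, hrest, tokB_cons_skip hnb hm, ih, hrest]
  | case4 i h =>
    rw [toIndicesGo, dif_neg h]
    rw [List.drop_eq_nil_of_le (by omega)]
    rfl

-- B's fold with pending state produces res ++ the tokenisation of pending ++ remaining input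
lemma foldB_inv (cs : List Char) : ∀ (res : List Int) (p? : Option Char),
    flushB (cs.foldl stepB (res, p?)) = res ++ tokB (p?.toList ++ cs) := by
  induction cs with
  | nil =>
    intro res p?
    rcases p? with _ | p
    · simp [flushB, tokB]
    · simp only [List.foldl_nil, Option.toList]
      rcases hm : monoD.get? [p] with _ | v <;> simp [flushB, tokB, hm]
  | cons c cs ih =>
    intro res p?
    rcases p? with _ | p
    · simpa [stepB] using ih res (some c)
    · simp only [List.foldl_cons, Option.toList, List.cons_append, List.nil_append]
      rcases hd : digraphD.get? [p, c] with _ | v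
      · rcases hm : monoD.get? [p] with _ | v
        · simp only [stepB, hd, hm]
          rw [ih res (some c)]
          simp [tokB, hd, hm]
        · simp only [stepB, hd, hm]
          rw [ih (res ++ [v]) (some c)]
          simp [tokB, hd, hm]
      · simp only [stepB, hd]
        rw [ih (res ++ [v]) none]
        simp [tokB, hd]

-- ===== VERDICT (by name: the statement is the Claim_ definition above) =====
theorem to_indices_spec : Claim_equal_to_indices := by
  intro text _
  unfold Spec_to_indices to_indices to_indices_alt
  rw [goA_eq_tokB text.toList 0, foldB_inv]
  simp
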